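-- pv_equiv track=rewrite | github.com/shiraej/AcronymFinder | acronymfind.py | makeAcrolist
-- ===== SOURCE A (Python) =====
-- def isCAP(letter):
--     ''' string --> boolean
--     checks if a letter is in caps, if it is returns True'''
--     if letter == 'A' or letter == 'B' or letter == 'C' or letter == 'D' or letter == 'E' or letter == 'F' or letter == 'G' or letter == 'H' or letter == 'I' or letter == 'J' or letter == 'K' or letter == 'L' or letter == 'M' or letter == 'N' or letter == 'O' or letter == 'P' or letter == 'Q' or letter == 'R' or letter == 'S' or letter == 'T' or letter == 'U' or letter == 'V' or letter == 'W' or letter == 'X' or letter == 'Y' or letter == 'Z':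
--         return True
--     else:
--         return False
--
-- def makeAcrolist (filestring):
--     '''string -> list
--     takes a string and makes a list of all the acronyms present, that is words that are made up of 2 or more capitalized letters'''
--     acrolist = []
--     acro = []
--     acrostringlist = []
--     noreplist = []
--
--     for letter in (filestring):
--         if isCAP(letter) == True:
--             acro.append(letter)
--         elif len(acro) > 1 and isCAP(letter) == False:
--             acrolist.append (acro)
--             acro = []
--         else:
--             acro = []
--
--     for acro in acrolist:
--         acro = ''.join(acro)
--         #print (acro)
--         acrostringlist.append(acro)
--
--     for acro in acrostringlist:
--         if acro in noreplist:
--             continue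
--         else:
--             noreplist.append(acro)
--     return noreplist
-- ===== SOURCE B (Python) =====
-- def makeAcrolist(filestring):
--     '''string -> list
--     Single index-jumping scan over maximal uppercase runs, then one ordered dedup.
--     Intended difference from the original: an acronym sitting at the very end of
--     the string is recorded too (the original drops it).'''
--     n = len(filestring)
--     runs = []
--     i = 0
--     while i < n:
--         if filestring[i].isupper():
--             j = i
--             while j < n and filestring[j].isupper():
--                 j += 1
--             if j - i >= 2:
--                 runs.append(filestring[i:j])
--             i = j
--         else:
--             i += 1
--     return list(dict.fromkeys(runs))
-- ===== Notes on version B (the rewrite author's own statement) =====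
-- stated objective: faster
-- what changed: Replaces A's stateful char-by-char run accumulation plus two further passes (join, membership-scan dedup) by a single index-jumping scan over maximal uppercase runs (inner while + slice) followed by one ordered dedup via dict.fromkeys.
-- intended difference: On strings whose last two characters are both uppercase, i.e. the string ends in an acronym, A silently drops that final acronym from its result while B records it; recording every capitalized run of length 2 or more is the function's stated purpose, so B's value is the intended one. — e.g. on makeAcrolist("US and UN"): A returns ["US"], B returns ["US", "UN"]
import Mathlib
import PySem

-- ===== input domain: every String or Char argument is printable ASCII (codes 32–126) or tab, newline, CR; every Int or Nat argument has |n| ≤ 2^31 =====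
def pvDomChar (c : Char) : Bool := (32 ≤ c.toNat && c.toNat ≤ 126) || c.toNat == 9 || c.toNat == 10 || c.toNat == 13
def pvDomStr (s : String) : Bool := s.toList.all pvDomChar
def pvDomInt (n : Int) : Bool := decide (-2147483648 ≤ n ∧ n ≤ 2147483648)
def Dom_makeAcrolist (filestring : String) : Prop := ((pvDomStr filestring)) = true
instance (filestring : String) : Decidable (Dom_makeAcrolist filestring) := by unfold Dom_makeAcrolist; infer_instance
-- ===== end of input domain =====

-- B replaces A's stateful char-by-char accumulation (three separate passes plus a
-- membership-scan dedup) by one index-jumping scan over maximal uppercase runs plus an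
-- ordered dedup; B also records an acronym at the very end of the string, which A drops
-- (see D_makeAcrolist below).

-- ===== PORT A =====
def pvIsCAP (letter : Char) : Bool :=
  letter == 'A' || letter == 'B' || letter == 'C' || letter == 'D' || letter == 'E' ||
  letter == 'F' || letter == 'G' || letter == 'H' || letter == 'I' || letter == 'J' ||
  letter == 'K' || letter == 'L' || letter == 'M' || letter == 'N' || letter == 'O' ||
  letter == 'P' || letter == 'Q' || letter == 'R' || letter == 'S' || letter == 'T' ||
  letter == 'U' || letter == 'V' || letter == 'W' || letter == 'X' || letter == 'Y' ||
  letter == 'Z'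

-- one iteration of A's first for-loop; state = (acrolist, acro)
def pvStepA (st : List (List Char) × List Char) (letter : Char) : List (List Char) × List Char :=
  if pvIsCAP letter = true then (st.1, st.2 ++ [letter])
  else if st.2.length > 1 ∧ pvIsCAP letter = false then (st.1 ++ [st.2], [])
  else (st.1, [])

def makeAcrolist (filestring : String) : List String :=
  let r := filestring.toList.foldl pvStepA ([], [])
  let acrolist := r.1
  -- second loop: acro = ''.join(acro)
  let acrostringlist := acrolist.foldl (fun acc acro => acc ++ [String.ofList acro]) ([] : List String)
  -- third loop: keep first occurrences
  acrostringlist.foldl (fun noreplist acro => if acro ∈ noreplist then noreplist else noreplist ++ [acro]) []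

-- ===== PORT B =====
-- B's outer while loop; when the current char is uppercase, takeWhile/dropWhile are the
-- inner while's j-scan and the slice filestring[i:j] (isupper exact on the ASCII domain)
def pvRuns : List Char → List String
  | [] => []
  | c :: rest =>
    if PySem.Chars.isupper c then
      (if 2 ≤ ((c :: rest).takeWhile PySem.Chars.isupper).length
         then [String.ofList ((c :: rest).takeWhile PySem.Chars.isupper)] else []) ++
      pvRuns ((c :: rest).dropWhile PySem.Chars.isupper)
    else pvRuns rest
termination_by cs => cs.length
decreasing_by
  · simp only [List.dropWhile_cons, *, if_pos]
    exact Nat.lt_succ_of_le (List.length_dropWhile_le _ _)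
  · simp

def makeAcrolist_alt (filestring : String) : List String :=
  PySem.List.dedup (pvRuns filestring.toList)

-- ===== PRECONDITION & SPEC =====
def pvEndsUp2 (cs : List Char) : Bool :=
  match cs.reverse with
  | a :: b :: _ => PySem.Chars.isupper a && PySem.Chars.isupper b
  | _ => false

-- On strings whose last two characters are both uppercase (the string ends in an acronym),
-- A silently drops that final acronym from its result while B records it; recording every
-- capitalized run of length 2 or more is the function's stated purpose, so B's value is
-- the intended one.
def D_makeAcrolist (filestring : String) : Prop := pvEndsUp2 filestring.toList = true
instance (filestring : String) : Decidable (D_makeAcrolist filestring) := by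
  unfold D_makeAcrolist; infer_instance

def Spec_makeAcrolist (filestring : String) (out : List String) : Prop :=
  ¬ D_makeAcrolist filestring → out = makeAcrolist_alt filestring
instance (filestring : String) (out : List String) : Decidable (Spec_makeAcrolist filestring out) := by
  unfold Spec_makeAcrolist; infer_instance

def pvDiffWitness_makeAcrolist : String := "US and UN"
def pvDiffWitnessOut_makeAcrolist : (List String) × (List String) := (["US"], ["US", "UN"])

-- ===== CLAIM (what is proved, stated in full; the proofs are below) =====
def Claim_unchanged_makeAcrolist : Prop := ∀ (filestring : String), Dom_makeAcrolist filestring → Spec_makeAcrolist filestring (makeAcrolist filestring)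
def Claim_changed_makeAcrolist : Prop := Dom_makeAcrolist (pvDiffWitness_makeAcrolist) ∧ D_makeAcrolist (pvDiffWitness_makeAcrolist) ∧ makeAcrolist (pvDiffWitness_makeAcrolist) = pvDiffWitnessOut_makeAcrolist.1 ∧ makeAcrolist_alt (pvDiffWitness_makeAcrolist) = pvDiffWitnessOut_makeAcrolist.2 ∧ pvDiffWitnessOut_makeAcrolist.1 ≠ pvDiffWitnessOut_makeAcrolist.2

-- ===== LEMMAS AND PROOFS =====

-- A's isCAP is exactly str.isupper on a single character
theorem pvIsCAP_eq (c : Char) : pvIsCAP c = PySem.Chars.isupper c := by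
  rw [Bool.eq_iff_iff]
  simp only [pvIsCAP, PySem.Chars.isupper, Bool.or_eq_true, beq_iff_eq, Bool.and_eq_true,
    decide_eq_true_eq, Char.le_def, Char.ext_iff, UInt32.le_iff_toNat_le, UInt32.ext_iff,
    Char.reduceVal, UInt32.toNat_ofNat]
  omega

-- A's first loop, reformulated with the pending run as an argument
def pvAux : List Char → List Char → List (List Char)
  | [], _ => []
  | c :: cs, ac =>
    if pvIsCAP c = true then pvAux cs (ac ++ [c])
    else (if ac.length > 1 then [ac] else []) ++ pvAux cs []

theorem foldl_pvStepA (cs : List Char) (al : List (List Char)) (ac : List Char) :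
    (List.foldl pvStepA (al, ac) cs).1 = al ++ pvAux cs ac := by
  induction cs generalizing al ac with
  | nil => simp [pvAux]
  | cons c cs ih =>
    by_cases h : pvIsCAP c = true
    · simp [pvStepA, pvAux, h, ih]
    · have h' : pvIsCAP c = false := by simpa using h
      by_cases hl : ac.length > 1
      · simp [pvStepA, pvAux, h', hl, ih]
      · simp [pvStepA, pvAux, h', hl, ih]

theorem pvEndsUp2_cons (c : Char) (cs : List Char) (h : pvEndsUp2 cs = true) :
    pvEndsUp2 (c :: cs) = true := by
  unfold pvEndsUp2 at *
  rcases hr : cs.reverse with _ | ⟨a, _ | ⟨b, t⟩⟩ <;> rw [hr] at h <;> simp at h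
  simp [hr, h]

theorem pvEndsUp2_suffix {l₂ l₁ : List Char} (h : l₂ <:+ l₁) (h2 : pvEndsUp2 l₂ = true) :
    pvEndsUp2 l₁ = true := by
  obtain ⟨t, rfl⟩ := h
  induction t with
  | nil => simpa using h2
  | cons a t ih => exact pvEndsUp2_cons a _ ih

theorem pvEndsUp2_of_allUp {cs : List Char} (h : ∀ x ∈ cs, PySem.Chars.isupper x = true)
    (hl : 2 ≤ cs.length) : pvEndsUp2 cs = true := by
  rcases hr : cs.reverse with _ | ⟨a, _ | ⟨b, t⟩⟩
  · simp at hr; simp [hr] at hl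
  · have := congrArg List.length hr; simp at this; omega
  · have ha : a ∈ cs := by rw [← List.mem_reverse, hr]; simp
    have hb : b ∈ cs := by rw [← List.mem_reverse, hr]; simp
    simp [pvEndsUp2, hr, h a ha, h b hb]

theorem pvAux_allUp (us : List Char) (v : Char) (tl ac : List Char)
    (hus : ∀ x ∈ us, pvIsCAP x = true) (hv : pvIsCAP v = false) :
    pvAux (us ++ v :: tl) ac = (if (ac ++ us).length > 1 then [ac ++ us] else []) ++ pvAux tl [] := by
  induction us generalizing ac with
  | nil => simp [pvAux, hv]
  | cons u us ih =>
    have hu : pvIsCAP u = true := hus u (by simp)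
    simp only [List.cons_append, pvAux, hu, if_true]
    rw [ih _ (fun x hx => hus x (by simp [hx]))]
    simp

theorem pvAux_eq_pvRuns (n : Nat) (cs : List Char) (hn : cs.length ≤ n)
    (h : pvEndsUp2 cs = false) : (pvAux cs []).map String.ofList = pvRuns cs := by
  induction n generalizing cs with
  | zero =>
    have : cs = [] := by cases cs <;> simp_all
    subst this; simp [pvAux, pvRuns]
  | succ n ih =>
    match cs with
    | [] => simp [pvAux, pvRuns]
    | c :: rest =>
      by_cases hc : PySem.Chars.isupper c = true
      · have hcC : pvIsCAP c = true := by rw [pvIsCAP_eq]; exact hc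
        rcases hd : (c :: rest).dropWhile PySem.Chars.isupper with _ | ⟨v, tl⟩
        · -- the whole remaining string is uppercase
          have hall : ∀ x ∈ c :: rest, PySem.Chars.isupper x = true := by
            simpa using (List.dropWhile_eq_nil_iff).1 hd
          have hlen : (c :: rest).length ≤ 1 := by
            by_contra hgt
            rw [pvEndsUp2_of_allUp hall (by omega)] at h; simp at h
          have : rest = [] := by cases rest <;> simp_all
          subst this
          simp [pvAux, pvRuns, hcC, hc]
        · have hv : PySem.Chars.isupper v = false := by
            have := List.head?_dropWhile_not PySem.Chars.isupper (c :: rest)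
            rw [hd] at this; simpa using this
          have hvC : pvIsCAP v = false := by rw [pvIsCAP_eq]; exact hv
          have htw : ∀ x ∈ (c :: rest).takeWhile PySem.Chars.isupper, pvIsCAP x = true :=
            fun x hx => by rw [pvIsCAP_eq]; exact List.mem_takeWhile_imp hx
          have hsplit : (c :: rest).takeWhile PySem.Chars.isupper ++ v :: tl = c :: rest := by
            rw [← hd]; exact List.takeWhile_append_dropWhile
          -- lengths for the inner IH
          have hsuf : tl <:+ (c :: rest) := ⟨(c :: rest).takeWhile PySem.Chars.isupper ++ [v], by
            simpa using hsplit⟩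
          have htl : pvEndsUp2 tl = false := by
            by_contra hb
            rw [pvEndsUp2_suffix hsuf (by simpa using hb)] at h; simp at h
          have htk : (c :: rest).takeWhile PySem.Chars.isupper
              = c :: rest.takeWhile PySem.Chars.isupper := by
            simp [hc]
          have hlen : tl.length ≤ n := by
            have h1 := congrArg List.length hsplit
            rw [htk] at h1
            simp at h1 hn; omega
          have hA : pvAux (c :: rest) []
              = (if ((c :: rest).takeWhile PySem.Chars.isupper).length > 1
                   then [(c :: rest).takeWhile PySem.Chars.isupper] else []) ++ pvAux tl [] := by
            conv_lhs => rw [← hsplit]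
            rw [pvAux_allUp _ _ _ _ htw hvC]
            simp only [List.nil_append]
          rw [hA, List.map_append, ih tl hlen htl, pvRuns, if_pos hc, hd, pvRuns,
            if_neg (show ¬ (PySem.Chars.isupper v = true) from by simp [hv])]
          congr 1
          by_cases h2 : 2 ≤ ((c :: rest).takeWhile PySem.Chars.isupper).length
          · rw [if_pos (show ((c :: rest).takeWhile PySem.Chars.isupper).length > 1 from by omega),
              if_pos h2]
            simp
          · rw [if_neg (show ¬ ((c :: rest).takeWhile PySem.Chars.isupper).length > 1 from by omega),
              if_neg h2]
            simp
      · have hcC : pvIsCAP c = false := by rw [pvIsCAP_eq]; simpa using hc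
        have hrest : pvEndsUp2 rest = false := by
          by_contra hb
          rw [pvEndsUp2_cons c rest (by simpa using hb)] at h; simp at h
        rw [pvRuns, if_neg (by simp [hc])]
        rw [← ih rest (by simp at hn; omega) hrest]
        simp [pvAux, hcC]

theorem foldl_mem_dedup (l acc : List String) :
    List.foldl (fun noreplist acro => if acro ∈ noreplist then noreplist else noreplist ++ [acro]) acc l
      = List.foldl PySem.Set.add acc l := by
  induction l generalizing acc with
  | nil => rfl
  | cons x t ih =>
    simp only [List.foldl_cons]
    rw [ih]
    congr 1
    simp only [PySem.Set.add]
    by_cases hx : x ∈ acc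
    · rw [if_pos hx, if_pos (by simpa using hx)]
    · rw [if_neg hx, if_neg (by simpa using hx)]

-- ===== VERDICT (by name: the statement is the Claim_ definition above) =====
theorem makeAcrolist_spec : Claim_unchanged_makeAcrolist := by
  intro fs _ hD
  have h : pvEndsUp2 fs.toList = false := by
    unfold D_makeAcrolist at hD; simpa using hD
  unfold makeAcrolist makeAcrolist_alt
  simp only [foldl_pvStepA fs.toList [] [], List.nil_append,
    PySem.List.foldl_append_singleton_eq_map, foldl_mem_dedup]
  rw [pvAux_eq_pvRuns fs.toList.length fs.toList le_rfl h]
  rfl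

theorem makeAcrolist_changed : Claim_changed_makeAcrolist := by
  unfold Claim_changed_makeAcrolist
  refine ⟨by decide, by decide, by decide, ?_, by decide⟩
  show makeAcrolist_alt "US and UN" = ["US", "UN"]
  have h : "US and UN".toList = ['U','S',' ','a','n','d',' ','U','N'] := by decide
  unfold makeAcrolist_alt
  rw [h]
  simp [pvRuns, PySem.Chars.isupper, PySem.List.dedup, PySem.Set.ofList, PySem.Set.add,
    PySem.Set.empty]
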